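-- pv_equiv track=rewrite | github.com/q-horton/uqcs-codejam-2023 | Solutions/Oddity.py | oddity
-- ===== SOURCE A (Python) =====
-- def oddity(a):
--     # Write your code here
--     char_app = {}
--     for i in a:
--         for j in i:
--             if not j in char_app:
--                 char_app[j] = 0
--     chars = sorted(list(char_app.keys()))
--     for b in chars:
--         for c in a:
--             if b in c:
--                 char_app[b] += 1
--     output = ""
--     for d in chars:
--         if char_app[d] % 2 == 1:
--             output += d
--     return output
-- ===== SOURCE B (Python) =====
-- def oddity(a):
--     result = set()
--     for s in a:
--         result ^= set(s)
--     return ''.join(sorted(result))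
-- ===== Notes on version B (the rewrite author's own statement) =====
-- stated objective: simpler
-- what changed: Replaces the dict build + per-char per-string counting pass + final parity filter with a single fold of symmetric differences over sets, so parity is tracked by set membership, the per-distinct-char rescan of all strings disappears, and no counts are kept.
import Mathlib
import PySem

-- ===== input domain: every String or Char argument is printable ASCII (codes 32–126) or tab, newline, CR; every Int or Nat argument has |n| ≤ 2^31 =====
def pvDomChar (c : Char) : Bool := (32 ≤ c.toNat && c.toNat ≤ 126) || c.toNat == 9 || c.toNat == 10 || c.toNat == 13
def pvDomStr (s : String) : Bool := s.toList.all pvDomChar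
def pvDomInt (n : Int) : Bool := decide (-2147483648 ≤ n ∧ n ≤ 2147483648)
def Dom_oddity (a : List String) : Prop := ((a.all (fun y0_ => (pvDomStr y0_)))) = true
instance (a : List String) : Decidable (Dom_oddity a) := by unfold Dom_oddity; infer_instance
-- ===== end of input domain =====

-- B replaces A's dict-building, per-char counting pass and parity filter with one fold of
-- set symmetric differences (parity tracked by membership); objective: simpler.


-- ===== PORT A =====
-- 'b in c' (length-1 string b in string c) is ported as char membership in c.toList — exact for single chars.
def oddity (a : List String) : String :=
  let char_app : PySem.Dict Char Int :=
    a.foldl (fun d i =>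
      i.toList.foldl (fun d j => if d.contains j then d else d.insert j 0) d)
      PySem.Dict.empty
  let chars := PySem.List.sorted char_app.keys (fun x => x) false
  let char_app :=
    chars.foldl (fun d b =>
      a.foldl (fun d c => if c.toList.contains b then d.modify b 0 (· + 1) else d) d)
      char_app
  let output : List Char :=
    chars.foldl (fun out d =>
      if PySem.Int.mod (char_app.getD d 0) 2 == 1 then out ++ [d] else out) []
  String.mk output

-- ===== PORT B =====
def oddity_alt (a : List String) : String :=
  let result : PySem.Set Char :=
    a.foldl (fun s i => PySem.Set.symmDiff s (PySem.Set.ofList i.toList)) PySem.Set.empty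
  String.mk (PySem.List.sorted result (fun x => x) false)

-- ===== PRECONDITION & SPEC =====
def Spec_oddity (a : List String) (out : String) : Prop := out = oddity_alt a
instance (a : List String) (out : String) : Decidable (Spec_oddity a out) := by unfold Spec_oddity; infer_instance

-- ===== CLAIM (what is proved, stated in full; the proofs are below) =====
def Claim_equal_oddity : Prop := ∀ (a : List String), Dom_oddity a → Spec_oddity a (oddity a)

-- ===== LEMMAS AND PROOFS =====

-- number of strings of a that contain the char x
def pvN (a : List String) (x : Char) : Nat := a.countP (fun s => decide (x ∈ s.toList))

-- B's set: membership is "parity of pvN flips membership in the accumulator"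
theorem pvB_fold_mem (a : List String) (s : PySem.Set Char) (x : Char) :
    (x ∈ a.foldl (fun s i => PySem.Set.symmDiff s (PySem.Set.ofList i.toList)) s) ↔
      ((x ∈ s ∧ ¬ (pvN a x % 2 = 1)) ∨ (pvN a x % 2 = 1 ∧ x ∉ s)) := by
  induction a generalizing s with
  | nil => simp [pvN]
  | cons i t ih =>
    simp only [List.foldl_cons, ih, PySem.Set.mem_symmDiff, PySem.Set.mem_ofList, pvN,
      List.countP_cons]
    by_cases h1 : x ∈ s <;> by_cases h2 : x ∈ i.toList <;>
      simp [h1, h2] <;> omega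

theorem pvB_fold_nodup (a : List String) (s : PySem.Set Char) (hs : s.Nodup) :
    (a.foldl (fun s i => PySem.Set.symmDiff s (PySem.Set.ofList i.toList)) s).Nodup := by
  induction a generalizing s with
  | nil => exact hs
  | cons i t ih =>
    exact ih _ (PySem.Set.nodup_symmDiff _ _ hs (PySem.Set.nodup_ofList _))

-- A's inner dict-building loop over one string's chars
theorem pvA_inner1_mem (cs : List Char) (d : PySem.Dict Char Int) (x : Char) :
    x ∈ (cs.foldl (fun d j => if d.contains j then d else d.insert j 0) d).keys ↔
      (x ∈ d.keys ∨ x ∈ cs) := by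
  induction cs generalizing d with
  | nil => simp
  | cons j t ih =>
    simp only [List.foldl_cons, ih]
    by_cases h : d.contains j
    · have hj : j ∈ d.keys := (PySem.Dict.contains_iff_mem_keys d j).mp h
      simp only [h, if_pos]
      constructor
      · rintro (h' | h') <;> simp [h', List.mem_cons]
      · rintro (h' | h') <;> try (first | exact Or.inl h')
        rcases List.mem_cons.mp h' with rfl | h'' 
        · exact Or.inl hj
        · exact Or.inr h''
    · simp [h, PySem.Dict.mem_keys_insert, List.mem_cons]; tauto

-- A's first dict: key membership
theorem pvA_dict1_mem (a : List String) (d : PySem.Dict Char Int) (x : Char) :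
    x ∈ (a.foldl (fun d i =>
      i.toList.foldl (fun d j => if d.contains j then d else d.insert j 0) d) d).keys ↔
      (x ∈ d.keys ∨ ∃ s ∈ a, x ∈ s.toList) := by
  induction a generalizing d with
  | nil => simp
  | cons i t ih =>
    simp only [List.foldl_cons, ih, pvA_inner1_mem, List.mem_cons]
    constructor
    · rintro ((h | h) | ⟨s, hs, hx⟩)
      · exact Or.inl h
      · exact Or.inr ⟨i, Or.inl rfl, h⟩
      · exact Or.inr ⟨s, Or.inr hs, hx⟩
    · rintro (h | ⟨s, (rfl | hs), hx⟩)
      · exact Or.inl (Or.inl h)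
      · exact Or.inl (Or.inr hx)
      · exact Or.inr ⟨s, hs, hx⟩

-- A's first dict: all stored values are 0
theorem pvA_inner1_getD (cs : List Char) (d : PySem.Dict Char Int)
    (hd : ∀ x, d.getD x 0 = 0) (x : Char) :
    (cs.foldl (fun d j => if d.contains j then d else d.insert j 0) d).getD x 0 = 0 := by
  induction cs generalizing d with
  | nil => exact hd x
  | cons j t ih =>
    simp only [List.foldl_cons]
    by_cases h : d.contains j
    · simp only [h, if_pos]; exact ih d hd
    · simp only [h]
      refine ih _ (fun y => ?_)
      simp only [Bool.false_eq_true, if_false, PySem.Dict.getD_insert]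
      split <;> [rfl; exact hd y]

theorem pvA_dict1_getD (a : List String) (d : PySem.Dict Char Int)
    (hd : ∀ x, d.getD x 0 = 0) (x : Char) :
    (a.foldl (fun d i =>
      i.toList.foldl (fun d j => if d.contains j then d else d.insert j 0) d) d).getD x 0 = 0 := by
  induction a generalizing d with
  | nil => exact hd x
  | cons i t ih =>
    exact ih _ (fun y => pvA_inner1_getD i.toList d hd y)

-- A's first dict: keys Nodup
theorem pvA_inner1_nodup (cs : List Char) (d : PySem.Dict Char Int) (hd : d.keys.Nodup) :
    (cs.foldl (fun d j => if d.contains j then d else d.insert j 0) d).keys.Nodup := by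
  induction cs generalizing d with
  | nil => exact hd
  | cons j t ih =>
    simp only [List.foldl_cons]
    by_cases h : d.contains j
    · simp only [h, if_pos]; exact ih d hd
    · simp only [h]; exact ih _ (PySem.Dict.nodup_keys_insert d j 0 hd)

theorem pvA_dict1_nodup (a : List String) (d : PySem.Dict Char Int) (hd : d.keys.Nodup) :
    (a.foldl (fun d i =>
      i.toList.foldl (fun d j => if d.contains j then d else d.insert j 0) d) d).keys.Nodup := by
  induction a generalizing d with
  | nil => exact hd
  | cons i t ih => exact ih _ (pvA_inner1_nodup i.toList d hd)

-- A's inner counting loop: only key b changes, by the number of strings containing b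
theorem pvA_count_inner (a : List String) (d : PySem.Dict Char Int) (b x : Char) :
    (a.foldl (fun d c => if c.toList.contains b then d.modify b 0 (· + 1) else d) d).getD x 0 =
      d.getD x 0 + (if x = b then (pvN a b : Int) else 0) := by
  induction a generalizing d with
  | nil => simp [pvN]
  | cons c t ih =>
    simp only [List.foldl_cons, ih]
    have hcnt : pvN (c :: t) b = (if b ∈ c.toList then 1 else 0) + pvN t b := by
      simp [pvN, List.countP_cons]; split <;> simp_all <;> omega
    by_cases hc : b ∈ c.toList
    · simp only [List.contains_eq_mem, hc, decide_true, if_pos, PySem.Dict.getD_modify, hcnt]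
      by_cases hx : x = b <;> simp [hx] <;> ring
    · simp only [List.contains_eq_mem, hc, decide_false, Bool.false_eq_true, if_false, hcnt]
      simp

-- A's outer counting loop: keys not in the processed list are untouched
theorem pvA_count_notmem (chars : List Char) (a : List String) (d : PySem.Dict Char Int)
    (x : Char) (hx : x ∉ chars) :
    (chars.foldl (fun d b =>
      a.foldl (fun d c => if c.toList.contains b then d.modify b 0 (· + 1) else d) d) d).getD x 0 =
      d.getD x 0 := by
  induction chars generalizing d with
  | nil => rfl
  | cons b t ih =>
    simp only [List.foldl_cons]
    rw [ih _ (fun h => hx (List.mem_cons_of_mem _ h)), pvA_count_inner]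
    have : x ≠ b := fun he => hx (he ▸ List.mem_cons_self ..)
    simp [this]

-- A's outer counting loop over Nodup chars
theorem pvA_count_outer (chars : List Char) (a : List String) (d : PySem.Dict Char Int)
    (h : chars.Nodup) (x : Char) (hx : x ∈ chars) :
    (chars.foldl (fun d b =>
      a.foldl (fun d c => if c.toList.contains b then d.modify b 0 (· + 1) else d) d) d).getD x 0 =
      d.getD x 0 + (pvN a x : Int) := by
  induction chars generalizing d with
  | nil => cases hx
  | cons b t ih =>
    have hnd := List.nodup_cons.mp h
    simp only [List.foldl_cons]
    rcases List.mem_cons.mp hx with rfl | hxt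
    · rw [pvA_count_notmem t a _ x hnd.1, pvA_count_inner]
      simp
    · rw [ih _ hnd.2 hxt, pvA_count_inner]
      have : x ≠ b := fun he => absurd (he ▸ hxt) hnd.1
      simp [this]

-- ===== VERDICT (by name: the statement is the Claim_ definition above) =====
theorem oddity_spec : Claim_equal_oddity := by
  intro a _
  unfold Spec_oddity oddity oddity_alt
  simp only []
  set d1 : PySem.Dict Char Int :=
    a.foldl (fun d i =>
      i.toList.foldl (fun d j => if d.contains j then d else d.insert j 0) d)
      PySem.Dict.empty with hd1
  set chars := PySem.List.sorted d1.keys (fun x => x) false with hchars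
  set d2 : PySem.Dict Char Int :=
    chars.foldl (fun d b =>
      a.foldl (fun d c => if c.toList.contains b then d.modify b 0 (· + 1) else d) d)
      d1 with hd2
  set result : PySem.Set Char :=
    a.foldl (fun s i => PySem.Set.symmDiff s (PySem.Set.ofList i.toList)) PySem.Set.empty
    with hres
  have hmemk : ∀ x : Char, x ∈ d1.keys ↔ ∃ s ∈ a, x ∈ s.toList := by
    intro x
    rw [hd1, pvA_dict1_mem]
    simp [PySem.Dict.keys_empty]
  have hnodk : d1.keys.Nodup := by
    rw [hd1]
    exact pvA_dict1_nodup a _ (by simp [PySem.Dict.keys_empty])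
  have hmemc : ∀ x : Char, x ∈ chars ↔ ∃ s ∈ a, x ∈ s.toList := by
    intro x
    rw [hchars, PySem.List.mem_sorted]
    exact hmemk x
  have hnodc : chars.Nodup := by
    rw [hchars]
    exact (PySem.List.sorted_perm d1.keys (fun x => x) false).nodup_iff.mpr hnodk
  have hpwlt : chars.Pairwise (· < ·) := by
    have h1 := PySem.List.sorted_pairwise d1.keys (fun x => x)
    rw [← hchars] at h1
    exact (h1.and hnodc).imp (fun h => lt_of_le_of_ne h.1 h.2)
  have hget : ∀ x ∈ chars, d2.getD x 0 = (pvN a x : Int) := by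
    intro x hx
    rw [hd2, pvA_count_outer chars a d1 hnodc x hx, hd1,
      pvA_dict1_getD a _ (fun y => PySem.Dict.getD_empty y 0) x]
    ring
  have houtput :
      chars.foldl (fun out d =>
        if PySem.Int.mod (d2.getD d 0) 2 == 1 then out ++ [d] else out) ([] : List Char) =
      chars.filter (fun x => decide (pvN a x % 2 = 1)) := by
    rw [PySem.List.foldl_append_if (fun d => PySem.Int.mod (d2.getD d 0) 2 == 1)
      (fun x => x) chars []]
    simp only [List.map_id_fun', id, List.nil_append]
    refine List.filter_congr (fun x hx => ?_)
    rw [hget x hx, PySem.Int.mod_eq_emod_of_pos (by norm_num)]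
    rw [Bool.eq_iff_iff, beq_iff_eq, decide_eq_true_iff]
    omega
  have hresmem : ∀ x : Char, x ∈ result ↔ pvN a x % 2 = 1 := by
    intro x
    rw [hres, pvB_fold_mem]
    simp [PySem.Set.empty]
  have hresnod : result.Nodup := by
    rw [hres]
    exact pvB_fold_nodup a _ List.nodup_nil
  have hsorted : PySem.List.sorted result (fun x => x) false =
      chars.filter (fun x => decide (pvN a x % 2 = 1)) := by
    apply PySem.List.sorted_eq_of_perm_of_pairwise_lt
    · rw [List.perm_ext_iff_of_nodup (hnodc.filter _) hresnod]
      intro x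
      rw [List.mem_filter, hresmem x, decide_eq_true_iff, hmemc x]
      constructor
      · rintro ⟨_, h⟩; exact h
      · intro h
        refine ⟨?_, h⟩
        have hpos : 0 < pvN a x := by omega
        obtain ⟨s, hs, hxs⟩ := List.countP_pos_iff.mp hpos
        exact ⟨s, hs, of_decide_eq_true hxs⟩
    · exact hpwlt.filter _
  rw [houtput, hsorted]
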